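-- pv_equiv track=rewrite | github.com/ajbrumleve/2023_AdentofCode | Day13/main.py | make_index_pair_arr
-- ===== SOURCE A (Python) =====
-- def make_index_pair_arr(indices, reference_index, maximum_index):
--     pair_list = []
--     indices = list(indices)
--     indices.append(reference_index)
--     indices.sort()
--     extremes = [0, maximum_index]
--     while len(indices) > 0:
--         first_val = indices.pop(0)
--         for index in indices:
--             while first_val not in extremes and index not in extremes:
--                 first_val -= 1
--                 index += 1
--             pair_list.append((first_val, index))
--     return pair_list
-- ===== SOURCE B (Python) =====
-- def make_index_pair_arr(indices, reference_index, maximum_index):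
--     vals = sorted(list(indices) + [reference_index])
--     extremes = (0, maximum_index)
--     out = []
--     for i, f in enumerate(vals):
--         for b in vals[i + 1:]:
--             if f not in extremes and b not in extremes:
--                 # f moves down and b moves up one unit per step: jump straight
--                 # to the nearest extreme either of them can reach.
--                 step = min([f - e for e in extremes if e < f] +
--                            [e - b for e in extremes if e > b])
--                 f -= step
--                 b += step
--             out.append((f, b))
--     return out
-- ===== Notes on version B (the rewrite author's own statement) =====
-- stated objective: faster
-- what changed: B replaces A's unit-step inner while loop (converging the two values one step at a time until one hits 0 or maximum_index) with a single arithmetic jump: step = min of the distances to each extreme reachable below f or above b; and replaces A's destructive pop(0)/mutating-list outer loop with a plain indexed scan over the sorted list. Pre_ excludes exactly the inputs on which A's inner loop never terminates (some value below min(0, maximum_index) while another is above max(0, maximum_index)); B raises ValueError (min of an empty list) there.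
import Mathlib
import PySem

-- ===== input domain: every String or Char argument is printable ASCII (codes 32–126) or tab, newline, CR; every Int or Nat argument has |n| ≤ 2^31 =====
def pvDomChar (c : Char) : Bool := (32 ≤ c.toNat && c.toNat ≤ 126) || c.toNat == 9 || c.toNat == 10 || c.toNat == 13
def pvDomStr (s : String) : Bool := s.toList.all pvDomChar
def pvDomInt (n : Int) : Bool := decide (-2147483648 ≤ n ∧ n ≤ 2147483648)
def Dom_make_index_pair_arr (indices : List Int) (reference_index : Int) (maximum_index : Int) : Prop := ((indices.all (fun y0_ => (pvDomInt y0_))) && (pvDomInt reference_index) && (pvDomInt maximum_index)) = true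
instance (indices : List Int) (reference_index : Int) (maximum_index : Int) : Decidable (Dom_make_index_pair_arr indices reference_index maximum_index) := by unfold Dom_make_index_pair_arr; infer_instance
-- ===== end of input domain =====

-- B replaces A's unit-step inner convergence loop by a single arithmetic jump to the nearest
-- reachable extreme, and A's pop(0) outer loop by an indexed scan of the sorted list (faster:
-- per-pair work drops from O(coordinate magnitude) to O(1)).


-- ===== PORT A =====
-- inner 'while first_val not in extremes and index not in extremes: first_val -= 1; index += 1'
-- (fuel makes the possibly-divergent Python loop total; on Pre_ inputs the fuel is never exhausted)
def pvConvA (extremes : List Int) (fuel : Nat) (f b : Int) : Int × Int :=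
  match fuel with
  | 0 => (f, b)
  | fuel + 1 =>
    if extremes.contains f || extremes.contains b then (f, b)
    else pvConvA extremes fuel (f - 1) (b + 1)

-- 'for index in indices: … pair_list.append((first_val, index))' — first_val persists across iterations
def pvInnerA (extremes : List Int) (M : Int) (f : Int) (rest : List Int)
    (acc : List (Int × Int)) : Int × List (Int × Int) :=
  match rest with
  | [] => (f, acc)
  | b :: t =>
    let p := pvConvA extremes (f.natAbs + M.natAbs + b.natAbs + 1) f b
    pvInnerA extremes M p.1 t (acc ++ [p])

-- 'while len(indices) > 0: first_val = indices.pop(0); …'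
def pvOuterA (extremes : List Int) (M : Int) (l : List Int) (acc : List (Int × Int)) : List (Int × Int) :=
  match l with
  | [] => acc
  | a :: t => pvOuterA extremes M t (pvInnerA extremes M a t acc).2

def make_index_pair_arr (indices : List Int) (reference_index : Int) (maximum_index : Int) : List (Int × Int) :=
  pvOuterA [0, maximum_index] maximum_index
    (PySem.List.sorted (indices ++ [reference_index]) (fun x => x) false) []

-- ===== PORT B =====
-- Source B's '[f - e for e in extremes if e < f] + [e - b for e in extremes if e > b]'
def pvSteps (M f b : Int) : List Int :=
  (([0, M].filter (fun e => decide (e < f))).map (fun e => f - e)) ++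
  (([0, M].filter (fun e => decide (b < e))).map (fun e => e - b))

-- one jump: 'step = min(steps)'.  Python's min raises on an empty list; that happens exactly on
-- the diverging inputs Pre_ excludes, where this port leaves the pair unchanged via minD's default.
def pvStepB (M f b : Int) : Int × Int :=
  if ¬ (f = 0 ∨ f = M) ∧ ¬ (b = 0 ∨ b = M) then
    let s := PySem.List.minD (pvSteps M f b) (fun x => x) 0
    (f - s, b + s)
  else (f, b)

-- B's inner 'for b in vals[i+1:]', threading f
def pvRowB (M : Int) (f : Int) (rest : List Int) : List (Int × Int) :=
  match rest with
  | [] => []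
  | b :: t =>
    let p := pvStepB M f b
    p :: pvRowB M p.1 t

-- B's outer 'for i, f in enumerate(vals)'
def pvAllB (M : Int) (l : List Int) : List (Int × Int) :=
  match l with
  | [] => []
  | a :: t => pvRowB M a t ++ pvAllB M t

def make_index_pair_arr_alt (indices : List Int) (reference_index : Int) (maximum_index : Int) : List (Int × Int) :=
  pvAllB maximum_index (PySem.List.sorted (indices ++ [reference_index]) (fun x => x) false)

-- ===== PRECONDITION & SPEC =====
-- Pre_ is exactly the set of inputs on which Python A terminates: its inner while loop diverges
-- precisely when some value lies below min(0, maximum_index) while another lies above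
-- max(0, maximum_index); Pre_ excludes only those diverging inputs.
def Pre_make_index_pair_arr (indices : List Int) (reference_index : Int) (maximum_index : Int) : Prop :=
  (min 0 maximum_index ≤ reference_index ∧ ∀ x ∈ indices, min 0 maximum_index ≤ x) ∨
  (reference_index ≤ max 0 maximum_index ∧ ∀ x ∈ indices, x ≤ max 0 maximum_index)
instance (indices : List Int) (reference_index : Int) (maximum_index : Int) : Decidable (Pre_make_index_pair_arr indices reference_index maximum_index) := by unfold Pre_make_index_pair_arr; infer_instance

def pvWitness_make_index_pair_arr : List Int × Int × Int := ([2, 5, 1], 3, 6)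

def Spec_make_index_pair_arr (indices : List Int) (reference_index : Int) (maximum_index : Int) (out : List (Int × Int)) : Prop := out = make_index_pair_arr_alt indices reference_index maximum_index
instance (indices : List Int) (reference_index : Int) (maximum_index : Int) (out : List (Int × Int)) : Decidable (Spec_make_index_pair_arr indices reference_index maximum_index out) := by unfold Spec_make_index_pair_arr; infer_instance

-- ===== CLAIM (what is proved, stated in full; the proofs are below) =====
def Claim_equal_make_index_pair_arr : Prop := ∀ (indices : List Int) (reference_index : Int) (maximum_index : Int), Dom_make_index_pair_arr indices reference_index maximum_index → Pre_make_index_pair_arr indices reference_index maximum_index → Spec_make_index_pair_arr indices reference_index maximum_index (make_index_pair_arr indices reference_index maximum_index)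

-- ===== LEMMAS AND PROOFS =====

lemma mem_pvSteps {M f b x : Int} :
    x ∈ pvSteps M f b ↔
      (0 < f ∧ x = f) ∨ (M < f ∧ x = f - M) ∨ (b < 0 ∧ x = -b) ∨ (b < M ∧ x = M - b) := by
  unfold pvSteps
  simp only [List.filter_cons, List.filter_nil, decide_eq_true_eq]
  split_ifs <;> simp <;> omega

lemma pvSteps_shift {M f b : Int}
    (hf : f - 1 ≠ 0 ∧ f - 1 ≠ M) (hb : b + 1 ≠ 0 ∧ b + 1 ≠ M) :
    pvSteps M (f - 1) (b + 1) = (pvSteps M f b).map (fun x => x - 1) := by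
  unfold pvSteps
  simp only [List.filter_cons, List.filter_nil, decide_eq_true_eq, List.map_append]
  split_ifs <;>
    simp only [List.map_cons, List.map_nil, List.cons_append, List.nil_append, List.append_nil,
      List.cons.injEq, List.nil_eq, and_true] <;>
    omega

lemma foldl_min_shift (t : List Int) : ∀ a : Int,
    List.foldl min (a - 1) (t.map (fun x => x - 1)) = (List.foldl min a t) - 1 := by
  induction t with
  | nil => intro a; simp
  | cons x t ih =>
    intro a
    simp only [List.map_cons, List.foldl_cons]
    rw [show min (a - 1) (x - 1) = min a x - 1 by omega]
    exact ih (min a x)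

lemma min?_map_shift (xs : List Int) :
    PySem.List.min? (xs.map (fun x => x - 1)) (fun x => x) =
      (PySem.List.min? xs (fun x => x)).map (fun x => x - 1) := by
  cases xs with
  | nil => rfl
  | cons a t =>
    simp only [List.map_cons, PySem.List.min?_id_cons, Option.map_some]
    rw [foldl_min_shift]

lemma one_le_pvSteps {M f b y : Int} (h : y ∈ pvSteps M f b) : 1 ≤ y := by
  rw [mem_pvSteps] at h; omega

lemma pvSteps_ne_nil {M f b : Int}
    (hc : ¬ (f = 0 ∨ f = M) ∧ ¬ (b = 0 ∨ b = M))
    (H : min 0 M ≤ f ∨ b ≤ max 0 M) :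
    ∃ y, y ∈ pvSteps M f b := by
  rcases (by omega : 0 ≤ M ∨ M < 0) with hM | hM
  · rcases H with h | h
    · exact ⟨f, mem_pvSteps.mpr (by omega)⟩
    · exact ⟨M - b, mem_pvSteps.mpr (by omega)⟩
  · rcases H with h | h
    · exact ⟨f - M, mem_pvSteps.mpr (by omega)⟩
    · exact ⟨-b, mem_pvSteps.mpr (by omega)⟩

-- the jump distance B's step takes (0 when a value already sits on an extreme)
def pvS (M f b : Int) : Int :=
  if ¬ (f = 0 ∨ f = M) ∧ ¬ (b = 0 ∨ b = M) then
    PySem.List.minD (pvSteps M f b) (fun x => x) 0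
  else 0

lemma stepB_eq_S (M f b : Int) : pvStepB M f b = (f - pvS M f b, b + pvS M f b) := by
  unfold pvStepB pvS
  by_cases h : ¬ (f = 0 ∨ f = M) ∧ ¬ (b = 0 ∨ b = M)
  · rw [if_pos h, if_pos h]
  · rw [if_neg h, if_neg h]; simp

lemma minD_cases {M f b : Int} (d : Int) :
    PySem.List.minD (pvSteps M f b) (fun x => x) d = d ∧ pvSteps M f b = [] ∨
    ∃ m, PySem.List.min? (pvSteps M f b) (fun x => x) = some m ∧
      PySem.List.minD (pvSteps M f b) (fun x => x) d = m ∧ m ∈ pvSteps M f b ∧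
      ∀ y ∈ pvSteps M f b, m ≤ y := by
  unfold PySem.List.minD
  cases h : PySem.List.min? (pvSteps M f b) (fun x => x) with
  | none => exact Or.inl ⟨rfl, (PySem.List.min?_eq_none_iff _ _).mp h⟩
  | some m =>
    refine Or.inr ⟨m, rfl, rfl, PySem.List.min?_mem h, ?_⟩
    intro y hy
    exact PySem.List.min?_isMin h y hy

lemma pvS_nonneg (M f b : Int) : 0 ≤ pvS M f b := by
  unfold pvS
  split_ifs
  · rcases minD_cases (M := M) (f := f) (b := b) 0 with ⟨he, _⟩ | ⟨m, _, he, hm, _⟩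
    · omega
    · have := one_le_pvSteps hm; omega
  · omega

lemma pvS_le (M f b : Int) : pvS M f b ≤ f.natAbs + M.natAbs + b.natAbs := by
  unfold pvS
  split_ifs
  · rcases minD_cases (M := M) (f := f) (b := b) 0 with ⟨he, _⟩ | ⟨m, _, he, hm, _⟩
    · omega
    · rw [mem_pvSteps] at hm; omega
  · omega

lemma pvS_le_f (M f b : Int) (hf : min 0 M ≤ f) : pvS M f b ≤ f - min 0 M := by
  unfold pvS
  split_ifs with hc
  · rcases minD_cases (M := M) (f := f) (b := b) 0 with ⟨he, _⟩ | ⟨m, _, he, _, hmin⟩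
    · omega
    · have hcand : (f - min 0 M) ∈ pvSteps M f b := by
        rcases (by omega : 0 ≤ M ∨ M < 0) with hM | hM
        · exact mem_pvSteps.mpr (by omega)
        · exact mem_pvSteps.mpr (by omega)
      have := hmin _ hcand
      omega
  · omega

lemma pvS_shift (M f b : Int)
    (hc : ¬ (f = 0 ∨ f = M) ∧ ¬ (b = 0 ∨ b = M))
    (H : min 0 M ≤ f ∨ b ≤ max 0 M) :
    pvS M (f - 1) (b + 1) = pvS M f b - 1 := by
  obtain ⟨w, hw⟩ := pvSteps_ne_nil hc H
  by_cases hnew : (f - 1 = 0 ∨ f - 1 = M) ∨ (b + 1 = 0 ∨ b + 1 = M)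
  · -- the step lands on an extreme: the old minimum is exactly 1
    have h1 : (1 : Int) ∈ pvSteps M f b := by
      rw [mem_pvSteps]; omega
    have hold : pvS M f b = 1 := by
      unfold pvS
      rw [if_pos hc]
      rcases minD_cases (M := M) (f := f) (b := b) 0 with ⟨_, hnil⟩ | ⟨m, _, he, hm, hmin⟩
      · rw [hnil] at h1; simp at h1
      · have := hmin _ h1
        have := one_le_pvSteps hm
        omega
    have hnew0 : pvS M (f - 1) (b + 1) = 0 := by
      unfold pvS
      rw [if_neg (by tauto)]
    omega
  · -- no extreme reached after one step: the candidate list shifts down by one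
    have hf' : f - 1 ≠ 0 ∧ f - 1 ≠ M := by tauto
    have hb' : b + 1 ≠ 0 ∧ b + 1 ≠ M := by tauto
    have hc' : ¬ (f - 1 = 0 ∨ f - 1 = M) ∧ ¬ (b + 1 = 0 ∨ b + 1 = M) := by tauto
    unfold pvS
    rw [if_pos hc, if_pos hc']
    unfold PySem.List.minD
    rw [pvSteps_shift hf' hb', min?_map_shift]
    rcases minD_cases (M := M) (f := f) (b := b) 0 with ⟨_, hnil⟩ | ⟨m, hsome, _, _, _⟩
    · rw [hnil] at hw; simp at hw
    · rw [hsome]; rfl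

-- A's per-pair unit-step convergence computes B's closed-form jump, given termination and fuel
lemma conv_eq_step (M : Int) (fuel : Nat) (f b : Int)
    (H : min 0 M ≤ f ∨ b ≤ max 0 M)
    (hfuel : (pvS M f b).toNat < fuel) :
    pvConvA [0, M] fuel f b = pvStepB M f b := by
  induction fuel generalizing f b with
  | zero => omega
  | succ n ih =>
    by_cases hc : (f = 0 ∨ f = M) ∨ (b = 0 ∨ b = M)
    · have h1 : ([(0:Int), M].contains f || [(0:Int), M].contains b) = true := by
        simp only [List.contains_cons, List.contains_nil, Bool.or_false, Bool.or_eq_true,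
          beq_iff_eq]
        omega
      simp only [pvConvA, h1, if_true]
      rw [stepB_eq_S]
      have hS : pvS M f b = 0 := by
        unfold pvS
        rw [if_neg (by tauto)]
      rw [hS]; simp
    · have h1 : ([(0:Int), M].contains f || [(0:Int), M].contains b) = false := by
        simp only [List.contains_cons, List.contains_nil, Bool.or_false,
          Bool.or_eq_false_iff, beq_eq_false_iff_ne]
        omega
      have hc' : ¬ (f = 0 ∨ f = M) ∧ ¬ (b = 0 ∨ b = M) := by tauto
      have hH' : min 0 M ≤ f - 1 ∨ b + 1 ≤ max 0 M := by omega
      have hshift := pvS_shift M f b hc' H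
      have hnn := pvS_nonneg M (f - 1) (b + 1)
      have hrec := ih (f - 1) (b + 1) hH' (by omega)
      simp only [pvConvA, h1, Bool.false_eq_true, if_false, hrec]
      rw [stepB_eq_S, stepB_eq_S, hshift]
      simp only [Prod.mk.injEq]
      constructor <;> ring

lemma inner_eq_row (M : Int) (f : Int) (rest : List Int) (acc : List (Int × Int))
    (H : min 0 M ≤ f ∨ ∀ x ∈ rest, x ≤ max 0 M) :
    pvInnerA [0, M] M f rest acc = ((pvInnerA [0, M] M f rest acc).1, acc ++ pvRowB M f rest) := by
  induction rest generalizing f acc with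
  | nil => simp [pvInnerA, pvRowB]
  | cons b t ih =>
    have Hb : min 0 M ≤ f ∨ b ≤ max 0 M := by
      rcases H with h | h
      · exact Or.inl h
      · exact Or.inr (h b (by simp))
    have hle := pvS_le M f b
    have hnn := pvS_nonneg M f b
    have hconv : pvConvA [0, M] (f.natAbs + M.natAbs + b.natAbs + 1) f b = pvStepB M f b :=
      conv_eq_step M _ f b Hb (by omega)
    have H' : min 0 M ≤ (pvStepB M f b).1 ∨ ∀ x ∈ t, x ≤ max 0 M := by
      rcases H with h | h
      · left
        rw [stepB_eq_S]
        have := pvS_le_f M f b h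
        simp only
        omega
      · exact Or.inr (fun x hx => h x (by simp [hx]))
    simp only [pvInnerA, hconv]
    rw [ih (pvStepB M f b).1 (acc ++ [pvStepB M f b]) H']
    simp [pvRowB]

lemma outer_eq_all (M : Int) (l : List Int) :
    ∀ acc, ((∀ x ∈ l, min 0 M ≤ x) ∨ (∀ x ∈ l, x ≤ max 0 M)) →
    pvOuterA [0, M] M l acc = acc ++ pvAllB M l := by
  induction l with
  | nil => intro acc _; simp [pvOuterA, pvAllB]
  | cons a t ih =>
    intro acc hl
    have Ha : min 0 M ≤ a ∨ ∀ x ∈ t, x ≤ max 0 M := by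
      rcases hl with h | h
      · exact Or.inl (h a (by simp))
      · exact Or.inr (fun x hx => h x (by simp [hx]))
    have hlt : (∀ x ∈ t, min 0 M ≤ x) ∨ (∀ x ∈ t, x ≤ max 0 M) := by
      rcases hl with h | h
      · exact Or.inl (fun x hx => h x (by simp [hx]))
      · exact Or.inr (fun x hx => h x (by simp [hx]))
    simp only [pvOuterA, pvAllB]
    rw [inner_eq_row M a t acc Ha]
    simp only
    rw [ih _ hlt]
    simp

-- ===== VERDICT (by name: the statement is the Claim_ definition above) =====
theorem make_index_pair_arr_spec : Claim_equal_make_index_pair_arr := by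
  intro indices reference_index maximum_index _ hpre
  unfold Spec_make_index_pair_arr make_index_pair_arr make_index_pair_arr_alt
  rw [outer_eq_all]
  · simp
  · rcases hpre with ⟨hr, hidx⟩ | ⟨hr, hidx⟩
    · refine Or.inl (fun x hx => ?_)
      rw [PySem.List.mem_sorted] at hx
      rcases List.mem_append.mp hx with h | h
      · exact hidx x h
      · simp at h; subst h; exact hr
    · refine Or.inr (fun x hx => ?_)
      rw [PySem.List.mem_sorted] at hx
      rcases List.mem_append.mp hx with h | h
      · exact hidx x h
      · simp at h; subst h; exact hr
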